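-- pv_equiv track=rewrite | github.com/val3rkq/trace-riscv-excel-gen | parser.py | words_end_positions
-- ===== SOURCE A (Python) =====
-- from typing import List, Dict, Union
--
-- def words_end_positions(text: str) -> Dict[int, str]:
--     words: List[str] = text.split()
--     positions: Dict[int, str] = {}
--     start_index: int = 0
--
--     for word in words:
--         start_pos: int = text.find(word, start_index)
--         if start_pos == -1:
--             continue
--         end_pos: int = start_pos + len(word) - 1
--         positions[end_pos] = word
--         start_index = end_pos + 1
--
--     return positions
-- ===== SOURCE B (Python) =====
-- def words_end_positions(text: str):
--     positions = {}
--     cur = []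
--     for i, ch in enumerate(text):
--         if ch.isspace():
--             if cur:
--                 positions[i - 1] = ''.join(cur)
--                 cur = []
--         else:
--             cur.append(ch)
--     if cur:
--         positions[len(text) - 1] = ''.join(cur)
--     return positions
-- ===== Notes on version B (the rewrite author's own statement) =====
-- stated objective: alternative
-- what changed: B replaces A's split() plus repeated text.find() re-scanning with a single character pass over enumerate(text) that buffers the current word and records (end_index, word) at each word boundary.
import Mathlib
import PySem

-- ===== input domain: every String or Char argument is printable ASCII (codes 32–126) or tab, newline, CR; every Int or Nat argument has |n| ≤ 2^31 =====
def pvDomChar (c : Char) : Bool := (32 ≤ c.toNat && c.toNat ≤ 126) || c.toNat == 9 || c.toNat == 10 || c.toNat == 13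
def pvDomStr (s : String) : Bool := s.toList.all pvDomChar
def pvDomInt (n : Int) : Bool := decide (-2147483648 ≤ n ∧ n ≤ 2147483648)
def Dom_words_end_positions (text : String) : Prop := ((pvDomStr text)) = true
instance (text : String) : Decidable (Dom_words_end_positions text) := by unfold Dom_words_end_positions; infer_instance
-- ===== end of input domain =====

-- B replaces A's split()+find() re-scanning with a single pass over enumerate(text) that
-- buffers the current word's characters and emits (end index, word) at each word boundary.

-- ===== PORT A =====
def words_end_positions (text : String) : List (Int × String) :=
  let words : List String := PySem.Str.split₀ text
  let st := words.foldl
    (fun (st : PySem.Dict Int String × Int) word =>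
      let start_pos : Int := PySem.Str.findFrom text word st.2
      if start_pos = -1 then st
      else
        let end_pos : Int := start_pos + PySem.Str.len word - 1
        (st.1.insert end_pos word, end_pos + 1))
    (PySem.Dict.empty, 0)
  st.1.items

-- ===== PORT B =====
def words_end_positions_alt (text : String) : List (Int × String) :=
  let st := (PySem.List.enumerate text.toList 0).foldl
    (fun (st : PySem.Dict Int String × List Char) p =>
      if PySem.Chars.isspace p.2 then
        if st.2.isEmpty then st
        else (st.1.insert (p.1 - 1) (String.ofList st.2), [])   -- ''.join(cur) = String.ofList cur
      else (st.1, st.2 ++ [p.2]))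
    (PySem.Dict.empty, [])
  let positions := if st.2.isEmpty then st.1
    else st.1.insert ((text.toList.length : Int) - 1) (String.ofList st.2)
  positions.items

-- ===== PRECONDITION & SPEC =====
def Spec_words_end_positions (text : String) (out : List (Int × String)) : Prop := out = words_end_positions_alt text
instance (text : String) (out : List (Int × String)) : Decidable (Spec_words_end_positions text out) := by unfold Spec_words_end_positions; infer_instance

-- ===== CLAIM (what is proved, stated in full; the proofs are below) =====
def Claim_equal_words_end_positions : Prop := ∀ (text : String), Dom_words_end_positions text → Spec_words_end_positions text (words_end_positions text)

-- ===== LEMMAS AND PROOFS =====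

/-- `not isspace`, the word-character test. -/
def pvNsp (c : Char) : Bool := !PySem.Chars.isspace c

/-- Canonical tokenisation: the (end index, word) pairs of `s`, scanning from absolute index `k`. -/
def pvWtok : Nat → List Char → List (Int × String)
  | _, [] => []
  | k, c :: r =>
    if PySem.Chars.isspace c then pvWtok (k+1) r
    else ((k : Int) + (r.takeWhile pvNsp).length,
          String.ofList (c :: r.takeWhile pvNsp))
         :: pvWtok (k + 1 + (r.takeWhile pvNsp).length) (r.dropWhile pvNsp)
termination_by _ l => l.length
decreasing_by
  · simp only [List.length_cons]; omega
  · have := List.length_dropWhile_le pvNsp r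
    simp only [List.length_cons]; omega

/-- A's loop body, moved from `String` words to their character lists. -/
def pvStepA (s : List Char) (st : PySem.Dict Int String × Int) (w : List Char) :
    PySem.Dict Int String × Int :=
  let start_pos : Int := PySem.Chars.findFrom s w st.2
  if start_pos = -1 then st
  else
    let end_pos : Int := start_pos + (w.length : Int) - 1
    (st.1.insert end_pos (String.ofList w), end_pos + 1)

/-- B's loop body. -/
def pvStepB (st : PySem.Dict Int String × List Char) (p : Int × Char) :
    PySem.Dict Int String × List Char :=
  if PySem.Chars.isspace p.2 then
    if st.2.isEmpty then st
    else (st.1.insert (p.1 - 1) (String.ofList st.2), [])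
  else (st.1, st.2 ++ [p.2])

lemma pvA_unfold (text : String) :
    words_end_positions text =
      ((PySem.Chars.split₀ text.toList).foldl (pvStepA text.toList)
        (PySem.Dict.empty, 0)).1.items := by
  have hwords : PySem.Str.split₀ text = (PySem.Chars.split₀ text.toList).map String.ofList := by
    rw [← PySem.Str.split₀_map_toList text, List.map_map]
    simp [Function.comp_def, String.ofList_toList]
  simp only [words_end_positions, hwords, List.foldl_map]
  have h := PySem.List.foldl_congr_mem (PySem.Chars.split₀ text.toList)
    (fun (st : PySem.Dict Int String × Int) (w : List Char) =>
      if PySem.Str.findFrom text (String.ofList w) st.2 = -1 then st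
      else
        (st.1.insert (PySem.Str.findFrom text (String.ofList w) st.2 + PySem.Str.len (String.ofList w) - 1)
            (String.ofList w),
          PySem.Str.findFrom text (String.ofList w) st.2 + PySem.Str.len (String.ofList w) - 1 + 1))
    (pvStepA text.toList) (PySem.Dict.empty, 0)
    (fun st w _ => by
      simp [pvStepA, PySem.Str.findFrom_eq, PySem.Str.len_eq, String.toList_ofList])
  rw [h]

lemma pvB_unfold (text : String) :
    words_end_positions_alt text =
      (let st := (PySem.List.enumerate text.toList 0).foldl pvStepB (PySem.Dict.empty, []);
       (if st.2.isEmpty then st.1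
        else st.1.insert ((text.toList.length : Int) - 1) (String.ofList st.2)).items) := by
  rfl

lemma pv_go_acc (s : List Char) : ∀ cur acc,
    PySem.Chars.split₀.go s cur acc = acc.reverse ++ PySem.Chars.split₀.go s cur [] := by
  induction s with
  | nil =>
    intro cur acc
    by_cases hcur : cur.isEmpty <;> simp [PySem.Chars.split₀.go, hcur]
  | cons c rest ih =>
    intro cur acc
    by_cases hc : PySem.Chars.isspace c = true
    · by_cases hcur : cur.isEmpty
      · simp only [PySem.Chars.split₀.go, hc, hcur, if_true]
        exact ih [] acc
      · simp only [PySem.Chars.split₀.go, hc, hcur, if_true, Bool.false_eq_true, if_false]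
        rw [ih [] (cur.reverse :: acc), ih [] [cur.reverse]]
        simp
    · simp only [PySem.Chars.split₀.go, hc]
      exact ih (c :: cur) acc

lemma pv_go_run (w : List Char) (hw : ∀ c ∈ w, PySem.Chars.isspace c = false) :
    ∀ v cur acc, PySem.Chars.split₀.go (w ++ v) cur acc =
      PySem.Chars.split₀.go v (w.reverse ++ cur) acc := by
  induction w with
  | nil => intro v cur acc; simp
  | cons c w' ih =>
    intro v cur acc
    have hc : PySem.Chars.isspace c = false := hw c (by simp)
    have hw' : ∀ x ∈ w', PySem.Chars.isspace x = false := fun x hx => hw x (by simp [hx])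
    simp only [List.cons_append, PySem.Chars.split₀.go, hc, Bool.false_eq_true, if_false]
    rw [ih hw' v (c :: cur) acc]
    simp

lemma pv_split_cons_space {c : Char} (h : PySem.Chars.isspace c = true) (r : List Char) :
    PySem.Chars.split₀ (c :: r) = PySem.Chars.split₀ r := by
  simp [PySem.Chars.split₀, PySem.Chars.split₀.go, h]

lemma pv_split_cons_word {c : Char} (h : PySem.Chars.isspace c = false) (r : List Char) :
    PySem.Chars.split₀ (c :: r) =
      (c :: r.takeWhile pvNsp) :: PySem.Chars.split₀ (r.dropWhile pvNsp) := by
  have hr : c :: r = (c :: r.takeWhile pvNsp) ++ r.dropWhile pvNsp := by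
    simp [List.takeWhile_append_dropWhile]
  have hnsp : ∀ x ∈ c :: r.takeWhile pvNsp, PySem.Chars.isspace x = false := by
    intro x hx
    rcases List.mem_cons.1 hx with h1 | h1
    · simpa [h1] using h
    · have := List.mem_takeWhile_imp h1
      simpa [pvNsp] using this
  show PySem.Chars.split₀.go (c :: r) [] [] = _
  rw [hr, pv_go_run _ hnsp _ [] []]
  rcases hdw : r.dropWhile pvNsp with _ | ⟨d, dw'⟩
  · simp [PySem.Chars.split₀.go, PySem.Chars.split₀]
  · have hd : PySem.Chars.isspace d = true := by
      have h2 := List.head_dropWhile_not pvNsp (l := r) (by simp [hdw])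
      simp only [hdw] at h2
      simpa [pvNsp] using h2
    have hgo : PySem.Chars.split₀.go (d :: dw') ((c :: r.takeWhile pvNsp).reverse ++ []) [] =
        PySem.Chars.split₀.go dw' [] [c :: r.takeWhile pvNsp] := by
      simp [PySem.Chars.split₀.go, hd]
    rw [hgo, pv_go_acc dw' [] [c :: r.takeWhile pvNsp]]
    have h2 : PySem.Chars.split₀ (d :: dw') = PySem.Chars.split₀ dw' := pv_split_cons_space hd dw'
    simp only [PySem.Chars.split₀] at h2 ⊢
    simp [h2]

lemma pv_find_run (u w t : List Char) (hu : ∀ c ∈ u, PySem.Chars.isspace c = true)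
    {c0 : Char} {w' : List Char} (hw : w = c0 :: w') (hc0 : PySem.Chars.isspace c0 = false) :
    PySem.Chars.find (u ++ (w ++ t)) w = (u.length : Int) := by
  have hinfix : w <:+: u ++ (w ++ t) := ⟨u, t, by simp⟩
  have h0 : 0 ≤ PySem.Chars.find (u ++ (w ++ t)) w :=
    (PySem.Chars.find_nonneg_iff _ _).2 hinfix
  obtain ⟨hpre, hmin⟩ := PySem.Chars.find_spec h0
  set f := PySem.Chars.find (u ++ (w ++ t)) w with hf
  have hatu : w <+: (u ++ (w ++ t)).drop u.length := by
    rw [List.drop_left]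
    exact List.prefix_append w t
  have hle : f.toNat ≤ u.length := by
    by_contra hgt
    exact hmin u.length (by omega) hatu
  have hge : ¬ f.toNat < u.length := by
    intro hlt
    have hdrop : (u ++ (w ++ t)).drop f.toNat = u.drop f.toNat ++ (w ++ t) :=
      List.drop_append_of_le_length (by omega)
    have hlen : 0 < (u.drop f.toNat).length := by
      rw [List.length_drop]; omega
    rcases hud : u.drop f.toNat with _ | ⟨e, restu⟩
    · rw [hud] at hlen; simp at hlen
    · have hpre' := hpre
      rw [hdrop, hud, hw] at hpre'
      simp only [List.cons_append] at hpre'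
      have hce : c0 = e := (List.cons_prefix_cons.1 hpre').1
      have hmem : e ∈ u := List.mem_of_mem_drop (by rw [hud]; simp)
      have := hu e hmem
      rw [← hce] at this
      rw [this] at hc0
      exact absurd hc0 (by simp)
  have : f.toNat = u.length := by omega
  omega

lemma pvA_fold (s : List Char) : ∀ (n : Nat) (rest : List Char), rest.length ≤ n →
    ∀ (k si : Nat) (d : PySem.Dict Int String),
    s.drop k = rest → k ≤ s.length → si ≤ k →
    (∀ j (h : j < s.length), si ≤ j → j < k → PySem.Chars.isspace s[j] = true) →
    (∀ p ∈ d.items, p.1 < (si : Int)) →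
    ((PySem.Chars.split₀ rest).foldl (pvStepA s) (d, (si : Int))).1.items =
      d.items ++ pvWtok k rest := by
  intro n
  induction n with
  | zero =>
    intro rest hlen k si d hdrop hk hsi hsp hkeys
    have hnil : rest = [] := List.eq_nil_of_length_eq_zero (by omega)
    subst hnil
    simp [PySem.Chars.split₀, PySem.Chars.split₀.go, pvWtok]
  | succ n ih =>
    intro rest hlen k si d hdrop hk hsi hsp hkeys
    rcases rest with _ | ⟨c, r⟩
    · simp [PySem.Chars.split₀, PySem.Chars.split₀.go, pvWtok]
    · have hklt : k < s.length := by
        have hl := congrArg List.length hdrop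
        rw [List.length_drop] at hl
        simp only [List.length_cons] at hl
        omega
      have hrl : s.length - k = r.length + 1 := by
        have hl := congrArg List.length hdrop
        rw [List.length_drop] at hl
        simpa using hl
      by_cases hc : PySem.Chars.isspace c = true
      · rw [pv_split_cons_space hc r]
        rw [show pvWtok k (c :: r) = pvWtok (k+1) r from by rw [pvWtok, if_pos hc]]
        apply ih r (by simp only [List.length_cons] at hlen; omega) (k+1) si d
        · have h1 : List.drop 1 (List.drop k s) = List.drop (k+1) s := List.drop_drop
          rw [← h1, hdrop]
          rfl
        · omega
        · omega
        · intro j hj h1 h2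
          by_cases hjk : j < k
          · exact hsp j hj h1 hjk
          · have hjeq : j = k := by omega
            subst hjeq
            have h0 : (List.drop j s)[0]'(by rw [hdrop]; simp) = c := by
              simp only [hdrop, List.getElem_cons_zero]
            rw [List.getElem_drop] at h0
            simpa using h0 ▸ hc
        · exact hkeys
      · -- word case
        rw [Bool.not_eq_true] at hc
        rw [pv_split_cons_word hc r, List.foldl_cons]
        have hsil : si ≤ s.length := le_trans hsi (le_of_lt hklt)
        set tw := r.takeWhile pvNsp with htw
        set dw := r.dropWhile pvNsp with hdwdef
        have hrtd : tw ++ dw = r := List.takeWhile_append_dropWhile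
        have hrlen : tw.length + dw.length = r.length := by
          rw [← hrtd, List.length_append]
        have hdropsi : List.drop si s = List.take (k - si) (List.drop si s) ++ ((c :: tw) ++ dw) := by
          conv_lhs => rw [← List.take_append_drop (k - si) (List.drop si s)]
          congr 1
          rw [List.drop_drop, show si + (k - si) = k from by omega, hdrop]
          simp [hrtd]
        have hulen : (List.take (k - si) (List.drop si s)).length = k - si := by
          simp only [List.length_take, List.length_drop]
          omega
        have hu : ∀ e ∈ List.take (k - si) (List.drop si s), PySem.Chars.isspace e = true := by
          intro e he
          obtain ⟨i, hi, hei⟩ := List.mem_iff_getElem.1 he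
          rw [List.getElem_take, List.getElem_drop] at hei
          rw [← hei]
          exact hsp (si + i) (by omega) (by omega) (by rw [hulen] at hi; omega)
        have hfind : PySem.Chars.findFrom s (c :: tw) ((si : Nat) : Int) = (k : Int) := by
          rw [PySem.Chars.findFrom_natCast s (c :: tw) si hsil]
          have hfr : PySem.Chars.find (List.drop si s) (c :: tw) = ((k - si : Nat) : Int) := by
            rw [hdropsi, pv_find_run _ _ _ hu rfl hc, hulen]

          rw [hfr, if_neg (by omega : ¬ (((k - si : Nat) : Int) = -1))]
          omega
        have hstep : pvStepA s (d, (si : Int)) (c :: tw) =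
            (d.insert ((k : Int) + (tw.length : Int)) (String.ofList (c :: tw)),
             ((k + 1 + tw.length : Nat) : Int)) := by
          simp only [pvStepA, hfind]
          rw [if_neg (by omega : ¬ ((k : Int) = -1))]
          have h1 : (k : Int) + ((c :: tw).length : Int) - 1 = (k : Int) + (tw.length : Int) := by
            simp only [List.length_cons]
            push_cast
            ring
          rw [h1]
          have h2 : (k : Int) + (tw.length : Int) + 1 = ((k + 1 + tw.length : Nat) : Int) := by
            push_cast
            ring
          rw [h2]
        rw [hstep]
        have hfresh : d.contains ((k : Int) + (tw.length : Int)) = false := by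
          rw [PySem.Dict.contains_eq_decide_mem_keys]
          simp only [decide_eq_false_iff_not]
          intro hmem
          simp only [PySem.Dict.keys] at hmem
          obtain ⟨p, hp, hp1⟩ := List.mem_map.1 hmem
          have hlt := hkeys p hp
          have hsik : (si : Int) ≤ (k : Int) := by exact_mod_cast hsi
          omega
        have hitems := PySem.Dict.items_insert_of_not_contains d (String.ofList (c :: tw)) hfresh
        have hdropk' : List.drop (k + 1 + tw.length) s = dw := by
          have h1 : List.drop (1 + tw.length) (List.drop k s) = List.drop (k + (1 + tw.length)) s :=
            List.drop_drop
          rw [show k + 1 + tw.length = k + (1 + tw.length) from by omega, ← h1, hdrop]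
          rw [show (1 : Nat) + tw.length = tw.length + 1 from by omega]
          rw [show c :: r = c :: (tw ++ dw) from by rw [hrtd]]
          simp
        have ihres := ih dw (by simp only [List.length_cons] at hlen; omega)
          (k + 1 + tw.length) (k + 1 + tw.length)
          (d.insert ((k : Int) + (tw.length : Int)) (String.ofList (c :: tw)))
          hdropk' (by omega) (le_refl _)
          (by intro j hj h1 h2; omega)
          (by
            intro p hp
            rw [hitems] at hp
            rcases List.mem_append.1 hp with h1 | h1
            · have := hkeys p h1
              have hsik : (si : Int) ≤ (k : Int) := by exact_mod_cast hsi
              omega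
            · simp only [List.mem_singleton] at h1
              rw [h1]
              push_cast
              omega)
        rw [ihres, hitems]
        rw [show pvWtok k (c :: r) =
            ((k : Int) + ((r.takeWhile pvNsp).length : Int),
              String.ofList (c :: r.takeWhile pvNsp))
             :: pvWtok (k + 1 + (r.takeWhile pvNsp).length) (r.dropWhile pvNsp) from by
          rw [pvWtok, if_neg (by simp [hc])]]
        simp [htw, hdwdef]

lemma pvB_run (w : List Char) (hw : ∀ c ∈ w, PySem.Chars.isspace c = false) :
    ∀ (k : Int) (d : PySem.Dict Int String) (cur : List Char),
      (PySem.List.enumerate w k).foldl pvStepB (d, cur) = (d, cur ++ w) := by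
  induction w with
  | nil => intro k d cur; simp [PySem.List.enumerate_nil]
  | cons c w' ih =>
    intro k d cur
    have hc : PySem.Chars.isspace c = false := hw c (by simp)
    rw [PySem.List.enumerate_cons, List.foldl_cons]
    show (PySem.List.enumerate w' (k+1)).foldl pvStepB (pvStepB (d, cur) (k, c)) = _
    rw [show pvStepB (d, cur) (k, c) = (d, cur ++ [c]) from by simp [pvStepB, hc]]
    rw [ih (fun x hx => hw x (by simp [hx])) (k+1) d (cur ++ [c])]
    simp

lemma pvB_fold (s : List Char) : ∀ (n : Nat) (rest : List Char), rest.length ≤ n →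
    ∀ (k : Nat) (d : PySem.Dict Int String),
    k + rest.length = s.length →
    (∀ p ∈ d.items, p.1 < (k : Int)) →
    (let st := (PySem.List.enumerate rest (k : Int)).foldl pvStepB (d, []);
     (if st.2.isEmpty then st.1
      else st.1.insert ((s.length : Int) - 1) (String.ofList st.2)).items) =
      d.items ++ pvWtok k rest := by
  intro n
  induction n with
  | zero =>
    intro rest hlen k d hklen hkeys
    have hnil : rest = [] := List.eq_nil_of_length_eq_zero (by omega)
    subst hnil
    simp [PySem.List.enumerate_nil, pvWtok]
  | succ n ih =>
    intro rest hlen k d hklen hkeys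
    rcases rest with _ | ⟨c, r⟩
    · simp [PySem.List.enumerate_nil, pvWtok]
    · by_cases hc : PySem.Chars.isspace c = true
      · simp only [PySem.List.enumerate_cons, List.foldl_cons]
        rw [show pvStepB (d, []) ((k : Int), c) = (d, []) from by simp [pvStepB, hc]]
        rw [show (k : Int) + 1 = ((k + 1 : Nat) : Int) from by push_cast; ring]
        have := ih r (by simp only [List.length_cons] at hlen; omega) (k + 1) d
          (by simp only [List.length_cons] at hklen; omega)
          (by intro p hp; have := hkeys p hp; push_cast; omega)
        simp only at this ⊢
        rw [this]
        rw [show pvWtok k (c :: r) = pvWtok (k+1) r from by rw [pvWtok, if_pos hc]]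
      · rw [Bool.not_eq_true] at hc
        set tw := r.takeWhile pvNsp with htw
        set dw := r.dropWhile pvNsp with hdwdef
        have hrtd : tw ++ dw = r := List.takeWhile_append_dropWhile
        have hrlen : tw.length + dw.length = r.length := by
          rw [← hrtd, List.length_append]
        have hnsp : ∀ x ∈ c :: tw, PySem.Chars.isspace x = false := by
          intro x hx
          rcases List.mem_cons.1 hx with h1 | h1
          · rw [h1]; exact hc
          · have := List.mem_takeWhile_imp h1
            simpa [pvNsp] using this
        have hsplit : c :: r = (c :: tw) ++ dw := by simp [hrtd]
        simp only at ⊢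
        rw [hsplit, PySem.List.enumerate_append, List.foldl_append]
        rw [pvB_run (c :: tw) hnsp (k : Int) d []]
        simp only [List.nil_append]
        rw [show (k : Int) + ((c :: tw).length : Int) = ((k + 1 + tw.length : Nat) : Int) from by
          simp only [List.length_cons]; push_cast; ring]
        have hwtok : pvWtok k (c :: r) =
            ((k : Int) + (tw.length : Int), String.ofList (c :: tw))
             :: pvWtok (k + 1 + tw.length) dw := by
          rw [pvWtok, if_neg (by simp [hc])]
        rcases hdwc : dw with _ | ⟨d0, dw'⟩
        · -- word runs to end of string
          simp only [PySem.List.enumerate_nil, List.foldl_nil, List.isEmpty_cons,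
            Bool.false_eq_true, if_false]
          have hslen : s.length = k + 1 + tw.length := by
            simp only [List.length_cons] at hklen
            rw [hdwc] at hrlen
            simp at hrlen
            omega
          have hkey : (s.length : Int) - 1 = (k : Int) + (tw.length : Int) := by
            rw [hslen]; push_cast; ring
          rw [hkey]
          have hfresh : d.contains ((k : Int) + (tw.length : Int)) = false := by
            rw [PySem.Dict.contains_eq_decide_mem_keys]
            simp only [decide_eq_false_iff_not]
            intro hmem
            simp only [PySem.Dict.keys] at hmem
            obtain ⟨p, hp, hp1⟩ := List.mem_map.1 hmem
            have := hkeys p hp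
            omega
          rw [PySem.Dict.items_insert_of_not_contains d _ hfresh]
          have htwnsp : ∀ x ∈ tw, pvNsp x = true := by
            intro x hx
            simp [pvNsp, hnsp x (by simp [hx])]
          rw [show pvWtok k (c :: tw ++ []) = [((k : Int) + (tw.length : Int), String.ofList (c :: tw))] from by
            simp only [List.append_nil]
            rw [pvWtok, if_neg (by simp [hc]),
              List.takeWhile_eq_self_iff.2 htwnsp, List.dropWhile_eq_nil_iff.2 htwnsp]
            simp [pvWtok]]
        · -- whitespace after the word
          have hdw2 : List.dropWhile pvNsp r = d0 :: dw' := by rw [← hdwdef, hdwc]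
          have hd0 : PySem.Chars.isspace d0 = true := by
            have h2 := List.head_dropWhile_not pvNsp (l := r) (by simp [hdw2])
            simp only [hdw2, List.head_cons] at h2
            simpa [pvNsp] using h2
          simp only [PySem.List.enumerate_cons, List.foldl_cons]
          rw [show pvStepB (d, c :: tw) (((k + 1 + tw.length : Nat) : Int), d0) =
              (d.insert ((k : Int) + (tw.length : Int)) (String.ofList (c :: tw)), []) from by
            simp only [pvStepB, hd0, if_true, List.isEmpty_cons, Bool.false_eq_true, if_false]
            have : ((k + 1 + tw.length : Nat) : Int) - 1 = (k : Int) + (tw.length : Int) := by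
              push_cast; ring
            rw [this]]
          have hfresh : d.contains ((k : Int) + (tw.length : Int)) = false := by
            rw [PySem.Dict.contains_eq_decide_mem_keys]
            simp only [decide_eq_false_iff_not]
            intro hmem
            simp only [PySem.Dict.keys] at hmem
            obtain ⟨p, hp, hp1⟩ := List.mem_map.1 hmem
            have := hkeys p hp
            omega
          have hitems := PySem.Dict.items_insert_of_not_contains d (String.ofList (c :: tw)) hfresh
          rw [show ((k + 1 + tw.length : Nat) : Int) + 1 = ((k + 2 + tw.length : Nat) : Int) from by
            push_cast; ring]
          have ihres := ih dw' (by
              simp only [List.length_cons] at hlen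
              rw [hdwc] at hrlen
              simp only [List.length_cons] at hrlen
              omega)
            (k + 2 + tw.length)
            (d.insert ((k : Int) + (tw.length : Int)) (String.ofList (c :: tw)))
            (by
              simp only [List.length_cons] at hklen
              rw [hdwc] at hrlen
              simp only [List.length_cons] at hrlen
              omega)
            (by
              intro p hp
              rw [hitems] at hp
              rcases List.mem_append.1 hp with h1 | h1
              · have := hkeys p h1
                push_cast
                omega
              · simp only [List.mem_singleton] at h1
                rw [h1]
                push_cast
                omega)
          simp only at ihres
          rw [ihres, hitems]
          rw [show (c :: tw ++ d0 :: dw') = c :: r from by rw [← hdwc, ← hsplit]]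
          rw [hwtok, hdwc]
          rw [show pvWtok (k + 1 + tw.length) (d0 :: dw') = pvWtok (k + 2 + tw.length) dw' from by
            rw [pvWtok, if_pos hd0, show k + 1 + tw.length + 1 = k + 2 + tw.length from by omega]]
          simp

-- ===== VERDICT (by name: the statement is the Claim_ definition above) =====
theorem words_end_positions_spec : Claim_equal_words_end_positions := by
  intro text _
  show words_end_positions text = words_end_positions_alt text
  rw [pvA_unfold, pvB_unfold]
  have hA := pvA_fold text.toList text.toList.length text.toList (le_refl _) 0 0
    PySem.Dict.empty (by simp) (by simp) (le_refl 0)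
    (by intro j h h1 h2; omega) (by simp [PySem.Dict.empty])
  have hB := pvB_fold text.toList text.toList.length text.toList (le_refl _) 0
    PySem.Dict.empty (by simp) (by simp [PySem.Dict.empty])
  simp only [Nat.cast_zero] at hA hB
  rw [hA, hB]
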